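-- pv_equiv track=rewrite | github.com/YaoYao0808/Leetcode | leetcode_牛客网/20190424_矩形覆盖.py | rectCover
-- ===== SOURCE A (Python) =====
-- def rectCover(number):
--     # write code here
--     num=[];
--     num.append(0);
--     num.append(1);
--     num.append(2);
--     for i in range(3 , number+1):
--         num.append(num[i-1]+num[i-2]);
--     return num[number];
-- ===== SOURCE B (Python) =====
-- def rectCover(number):
--     if number == 0:
--         return 0
--     def fd(k):
--         # returns (Fib(k), Fib(k+1)) with Fib(0)=0, Fib(1)=1, by fast doubling
--         if k == 0:
--             return (0, 1)
--         a, b = fd(k // 2)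
--         c = a * (2 * b - a)
--         d = a * a + b * b
--         if k % 2:
--             return (d, c + d)
--         return (c, d)
--     return fd(number + 1)[0]
-- ===== Notes on version B (the rewrite author's own statement) =====
-- stated objective: faster
-- what changed: Replaced the linear loop that appends every Fibonacci value to a list with recursive fast-doubling on the index, computing only O(log n) intermediate pairs; Pre_ excludes negative numbers, where A's values for -1..-3 come from accidental negative-index wraparound (and A raises IndexError below -4).
-- outside the precondition, e.g. on rectCover(-1): A returns 2, B returns 0; on rectCover(-2): A returns 1, B raises RecursionError; on rectCover(-3): A returns 0, B raises RecursionError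
import Mathlib
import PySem

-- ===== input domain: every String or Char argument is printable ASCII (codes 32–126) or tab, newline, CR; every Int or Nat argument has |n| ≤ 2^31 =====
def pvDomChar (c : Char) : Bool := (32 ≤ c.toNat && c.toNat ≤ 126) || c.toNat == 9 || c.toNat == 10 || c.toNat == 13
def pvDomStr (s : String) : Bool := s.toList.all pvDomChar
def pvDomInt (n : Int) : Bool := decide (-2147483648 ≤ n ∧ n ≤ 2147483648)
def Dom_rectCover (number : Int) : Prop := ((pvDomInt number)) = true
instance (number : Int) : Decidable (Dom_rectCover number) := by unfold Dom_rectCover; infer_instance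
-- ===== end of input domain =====

-- B replaces A's linear list-building Fibonacci loop with recursive fast doubling (objective: faster).

-- ===== PORT A =====
-- literal transliteration of A: build num = [0,1,2], extend with num[i-1]+num[i-2] for i in range(3, number+1), return num[number]
def rectCover (number : Int) : Int :=
  let num : List Int := [0, 1, 2]
  let num := (PySem.List.pyRange 3 (number + 1) 1).foldl
    (fun acc i => acc ++ [PySem.List.pyGetD acc (i - 1) 0 + PySem.List.pyGetD acc (i - 2) 0]) num
  PySem.List.pyGetD num number 0

-- ===== PORT B =====
-- fast-doubling helper of Source B: fdB k = (Fib k, Fib (k+1)); Python's k // 2 on k ≥ 0 is Nat division,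
-- so the recursion is carried on Nat (Pre_ restricts to number ≥ 0)
def fdB : Nat → Int × Int
  | 0 => (0, 1)
  | (k + 1) =>
    let p := fdB ((k + 1) / 2)
    let a := p.1
    let b := p.2
    let c := a * (2 * b - a)
    let d := a * a + b * b
    if (k + 1) % 2 = 1 then (d, c + d) else (c, d)
  decreasing_by exact Nat.div_lt_self (Nat.succ_pos k) (by omega)

def rectCover_alt (number : Int) : Int :=
  if number = 0 then 0 else (fdB (number + 1).toNat).1

-- ===== PRECONDITION & SPEC =====
-- Pre_ excludes negative numbers: A's values on -1..-3 come from accidental negative-index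
-- wraparound (num[-1] etc.) and A raises IndexError for number ≤ -4.
def Pre_rectCover (number : Int) : Prop := 0 ≤ number
instance (number : Int) : Decidable (Pre_rectCover number) := by unfold Pre_rectCover; infer_instance
def pvWitness_rectCover : Int := 5

def Spec_rectCover (number : Int) (out : Int) : Prop := out = rectCover_alt number
instance (number : Int) (out : Int) : Decidable (Spec_rectCover number out) := by unfold Spec_rectCover; infer_instance

-- ===== CLAIM (what is proved, stated in full; the proofs are below) =====
def Claim_equal_rectCover : Prop := ∀ (number : Int), Dom_rectCover number → Pre_rectCover number → Spec_rectCover number (rectCover number)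

-- ===== LEMMAS AND PROOFS =====

-- fast doubling computes Fibonacci pairs
theorem fdB_eq (k : Nat) : fdB k = ((Nat.fib k : Int), (Nat.fib (k + 1) : Int)) := by
  induction k using Nat.strong_induction_on with
  | _ k ih =>
    match k with
    | 0 => simp [fdB]
    | (k + 1) =>
      have hm : (k + 1) / 2 < k + 1 := Nat.div_lt_self (Nat.succ_pos k) (by omega)
      have ihm := ih _ hm
      rw [fdB, ihm]
      set m := (k + 1) / 2 with hmdef
      have hle : Nat.fib m ≤ 2 * Nat.fib (m + 1) :=
        le_trans Nat.fib_le_fib_succ (by omega)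
      have h2m : ((Nat.fib (2 * m) : Nat) : Int)
          = (Nat.fib m : Int) * (2 * (Nat.fib (m + 1) : Int) - (Nat.fib m : Int)) := by
        rw [Nat.fib_two_mul, Nat.cast_mul, Nat.cast_sub hle]; push_cast; ring
      have h2m1 : ((Nat.fib (2 * m + 1) : Nat) : Int)
          = (Nat.fib m : Int) * (Nat.fib m : Int) + (Nat.fib (m + 1) : Int) * (Nat.fib (m + 1) : Int) := by
        rw [Nat.fib_two_mul_add_one]; push_cast; ring
      have hdm := Nat.div_add_mod (k + 1) 2
      rcases Nat.mod_two_eq_zero_or_one (k + 1) with h | h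
      · have hk : k + 1 = 2 * m := by omega
        rw [if_neg (by omega)]
        refine Prod.ext ?_ ?_
        · simp only [hk]; rw [h2m]
        · simp only [hk]; rw [h2m1]
      · have hk : k + 1 = 2 * m + 1 := by omega
        rw [if_pos h]
        refine Prod.ext ?_ ?_
        · simp only [hk]; rw [h2m1]
        · simp only [hk]
          rw [show 2 * m + 1 + 1 = 2 * m + 2 from by omega, Nat.fib_add_two, Nat.cast_add,
            h2m, h2m1]

-- the value A's loop builds
def fibEntry (k : Nat) : Int := (Nat.fib (k + 2) : Int)

theorem rectCover_loop (n : Nat) (hn : 2 ≤ n) :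
    (PySem.List.pyRange 3 ((n : Int) + 1) 1).foldl
      (fun acc i => acc ++ [PySem.List.pyGetD acc (i - 1) 0 + PySem.List.pyGetD acc (i - 2) 0])
      [0, 1, 2]
    = 0 :: (List.range n).map fibEntry := by
  induction n with
  | zero => omega
  | succ n ihn =>
    rcases Nat.lt_or_ge n 2 with h2 | h2
    · interval_cases n
      · omega
      · norm_num [PySem.List.pyRange_one_eq_nil, List.range_succ, fibEntry]
    · have hrange : PySem.List.pyRange 3 ((n : Int) + 1 + 1) 1
          = PySem.List.pyRange 3 ((n : Int) + 1) 1 ++ [(n : Int) + 1] := by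
        have := PySem.List.pyRange_one_succ_right (a := 3) (b := (n : Int) + 1) (by exact_mod_cast by omega)
        simpa using this
      have hcast : ((n : Int) + 1 + 1) = (((n + 1 : Nat) : Int) + 1) := by push_cast; ring
      rw [← hcast, hrange, List.foldl_append, ihn h2]
      simp only [List.foldl_cons, List.foldl_nil]
      have hlen : ((List.range n).map fibEntry).length = n := by simp
      have hget1 : PySem.List.pyGetD (0 :: (List.range n).map fibEntry) ((n : Int) + 1 - 1) 0
          = fibEntry (n - 1) := by
        have : ((n : Int) + 1 - 1) = ((n : Nat) : Int) := by ring
        rw [this, PySem.List.pyGetD_natCast]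
        rcases Nat.exists_eq_add_of_le h2 with ⟨j, hj⟩
        subst hj
        simp [List.getD, Nat.add_comm 2 j]
      have hget2 : PySem.List.pyGetD (0 :: (List.range n).map fibEntry) ((n : Int) + 1 - 2) 0
          = fibEntry (n - 2) := by
        have : ((n : Int) + 1 - 2) = (((n - 1 : Nat)) : Int) := by push_cast [Nat.cast_sub (by omega : 1 ≤ n)]; ring
        rw [this, PySem.List.pyGetD_natCast]
        rcases Nat.exists_eq_add_of_le h2 with ⟨j, hj⟩
        subst hj
        have h1 : 2 + j - 1 = j + 1 := by omega
        have h2' : 2 + j - 2 = j := by omega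
        simp [h1, h2', List.getD]
      rw [hget1, hget2]
      have hsum : fibEntry (n - 1) + fibEntry (n - 2) = fibEntry n := by
        rcases Nat.exists_eq_add_of_le h2 with ⟨j, hj⟩
        subst hj
        have h1 : 2 + j - 1 = j + 1 := by omega
        have h2' : 2 + j - 2 = j := by omega
        have hN : Nat.fib (j + 3) + Nat.fib (j + 2) = Nat.fib (j + 4) := by
          have e1 := Nat.fib_add_two (n := j + 2)
          simp only [show j + 2 + 2 = j + 4 from by omega,
            show j + 2 + 1 = j + 3 from by omega] at e1
          omega
        simp only [fibEntry, h1, h2']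
        simp only [show 2 + j + 2 = j + 4 from by omega, show j + 1 + 2 = j + 3 from by omega]
        exact_mod_cast hN
      rw [hsum]
      simp [List.range_succ]

-- value of A at a cast natural ≥ 2
theorem rectCover_natCast (n : Nat) (hn : 2 ≤ n) :
    rectCover (n : Int) = (Nat.fib (n + 1) : Int) := by
  unfold rectCover
  simp only
  rw [rectCover_loop n hn, PySem.List.pyGetD_natCast]
  rcases Nat.exists_eq_add_of_le hn with ⟨j, hj⟩
  subst hj
  have h1 : 2 + j - 1 = j + 1 := by omega
  simp [List.getD, fibEntry, Nat.add_comm 2 j]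

-- ===== VERDICT (by name: the statement is the Claim_ definition above) =====
theorem rectCover_spec : Claim_equal_rectCover := by
  intro number _ hpre
  unfold Spec_rectCover
  have hpre' : 0 ≤ number := hpre
  have hnum : number = ((number.toNat : Nat) : Int) := by omega
  rw [hnum]
  set n := number.toNat with hn
  rcases Nat.lt_or_ge n 2 with h2 | h2
  · interval_cases n
    · decide
    · have hA : rectCover ((1 : Nat) : Int) = 1 := by decide
      rw [hA]
      unfold rectCover_alt
      norm_num [fdB_eq]
      decide
  · rw [rectCover_natCast n h2]
    unfold rectCover_alt
    rw [if_neg (by exact_mod_cast by omega)]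
    have : (((n : Int) + 1)).toNat = n + 1 := by omega
    rw [this, fdB_eq]
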